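-- pv_equiv track=rewrite | github.com/rom1577/PythonLessons | pythonProject/forth_asd/asd_forth_skobki.py | skobki
-- ===== SOURCE A (Python) =====
-- class Stack:
--     def __init__(self):
--         self.stack = []
--
--     def size(self):
--         return len(self.stack)
--
--     def pop(self):
--         if self.size() != 0:
--             a = self.stack[-1]
--             b = self.stack
--             b.pop(-1)
--             self.stack = b
--             return a
--         return None
--
--     def push(self, value):
--         self.stack.append(value)
--
--     def peek(self):
--         if self.size() != 0:
--             return self.stack[-1]
--         return None
--
--     def to_list(self):
--         a = []
--         for i in range(self.size()):
--             a.append(self.stack[i])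
--         return a
--
-- def skobki(s:str)->bool:
--     stack = Stack()
--     st = list(s)
--
--     # заполнение стека элементами списка
--     for i in range(len(st)):
--         stack.push(st[i])
--
--     # счетчики
--     i = 0
--     k = 0
--     # удаление элементов стека в циклах
--     while stack.peek() == ')':
--         stack.pop()
--         i += 1
--         while stack.peek() == '(':
--             stack.pop()
--             k += 1
--     return i == k and i != 0 and k != 0
-- ===== SOURCE B (Python) =====
-- def skobki(s: str) -> bool:
--     run = []
--     for c in reversed(s):
--         if c != '(' and c != ')':
--             break
--         run.append(c)
--     return run[:1] == [')'] and run.count('(') == run.count(')')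
-- ===== Notes on version B (the rewrite author's own statement) =====
-- stated objective: simpler
-- what changed: Replaces A's hand-rolled Stack class and nested pop-while loops with a single right-to-left scan that collects the maximal bracket-only suffix and compares its open/close counts.
import Mathlib
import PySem

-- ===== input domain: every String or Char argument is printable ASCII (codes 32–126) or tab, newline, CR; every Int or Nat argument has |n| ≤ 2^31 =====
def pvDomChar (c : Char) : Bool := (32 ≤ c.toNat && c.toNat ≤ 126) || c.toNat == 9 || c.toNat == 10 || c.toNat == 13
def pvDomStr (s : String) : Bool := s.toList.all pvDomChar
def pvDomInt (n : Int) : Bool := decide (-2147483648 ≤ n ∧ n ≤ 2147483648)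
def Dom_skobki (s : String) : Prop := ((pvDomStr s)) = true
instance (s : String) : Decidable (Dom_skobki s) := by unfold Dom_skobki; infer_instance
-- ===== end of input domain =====

-- B drops A's Stack class and nested while loops: it takes the maximal bracket-only
-- suffix (scanning from the right) and compares the two bracket counts (objective: simpler).

-- ===== PORT A =====
-- inner while loop: 'while stack.peek() == '(' : stack.pop(); k += 1'
-- (the stack is the character list; peek = last element, pop = drop last)
def pvInnerA : List Char → Nat → List Char × Nat
  | st, k =>
    if h : st.getLast? = some '(' then
      pvInnerA st.dropLast (k + 1)
    else (st, k)
  termination_by st _ => st.length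
  decreasing_by
    have hne : st ≠ [] := by rintro rfl; simp at h
    have := List.length_pos_iff.mpr hne
    simp [List.length_dropLast]; omega

-- the inner loop only pops, so it never lengthens the stack (needed for pvOuterA's termination)
theorem pvInnerA_length (st : List Char) (k : Nat) : (pvInnerA st k).1.length ≤ st.length := by
  unfold pvInnerA
  split
  · exact le_trans (pvInnerA_length _ _) (by simp [List.length_dropLast])
  · exact le_refl _
  termination_by st.length
  decreasing_by
    rename_i h
    have hne : st ≠ [] := by rintro rfl; simp at h
    have := List.length_pos_iff.mpr hne
    simp [List.length_dropLast]; omega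

-- outer while loop: 'while stack.peek() == ')' : stack.pop(); i += 1; <inner loop>'
def pvOuterA : List Char → Nat → Nat → Nat × Nat
  | st, i, k =>
    if h : st.getLast? = some ')' then
      pvOuterA (pvInnerA st.dropLast k).1 (i + 1) (pvInnerA st.dropLast k).2
    else (i, k)
  termination_by st _ _ => st.length
  decreasing_by
    have hne : st ≠ [] := by rintro rfl; simp at h
    have h1 := pvInnerA_length st.dropLast k
    have := List.length_pos_iff.mpr hne
    simp [List.length_dropLast] at h1 ⊢; omega

def skobki (s : String) : Bool :=
  -- stack after the push loop holds the characters of s in order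
  let st := s.toList
  let r := pvOuterA st 0 0
  (r.1 == r.2) && !(r.1 == 0) && !(r.2 == 0)

-- ===== PORT B =====
def skobki_alt (s : String) : Bool :=
  let run := s.toList.reverse.takeWhile (fun c => c == '(' || c == ')')
  (run.take 1 == [')']) && (run.count '(' == run.count ')')

-- ===== PRECONDITION & SPEC =====
def Spec_skobki (s : String) (out : Bool) : Prop := out = skobki_alt s
instance (s : String) (out : Bool) : Decidable (Spec_skobki s out) := by unfold Spec_skobki; infer_instance

-- ===== CLAIM (what is proved, stated in full; the proofs are below) =====
def Claim_equal_skobki : Prop := ∀ (s : String), Dom_skobki s → Spec_skobki s (skobki s)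

-- ===== LEMMAS AND PROOFS =====

-- the inner loop on the reversed view: strip the maximal run of '(' and count it
theorem pvInnerA_rev (r : List Char) (k : Nat) :
    pvInnerA r.reverse k =
      ((r.dropWhile (fun c => c == '(')).reverse, k + (r.takeWhile (fun c => c == '(')).length) := by
  induction r generalizing k with
  | nil => unfold pvInnerA; simp
  | cons c rs ih =>
    unfold pvInnerA
    by_cases hc : c = '('
    · subst hc
      simp only [List.reverse_cons, List.getLast?_concat, List.dropLast_concat,
        Option.some.injEq, dif_pos rfl, List.takeWhile_cons, List.dropWhile_cons, beq_self_eq_true,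
        if_pos, List.length_cons]
      rw [ih]
      simp; omega
    · have hlast : (rs.reverse ++ [c]).getLast? = some c := List.getLast?_concat
      simp only [List.reverse_cons, hlast, Option.some.injEq, List.takeWhile_cons,
        List.dropWhile_cons]
      rw [dif_neg (by simpa using hc)]
      simp [hc]

-- splitting a bracket-run takeWhile at the end of the leading '(' run
theorem takeWhile_br_split (rs : List Char) :
    rs.takeWhile (fun c => c == '(' || c == ')') =
      rs.takeWhile (fun c => c == '(')
        ++ (rs.dropWhile (fun c => c == '(')).takeWhile (fun c => c == '(' || c == ')') := by
  induction rs with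
  | nil => simp
  | cons c rs ih =>
    by_cases hc : c = '('
    · subst hc; simpa using ih
    · simp [List.takeWhile_cons, hc]

theorem count_takeWhile_open_close (rs : List Char) :
    (rs.takeWhile (fun c => c == '(')).count ')' = 0 := by
  rw [List.count_eq_zero]
  intro h
  have := List.mem_takeWhile_imp h
  simp at this

theorem count_takeWhile_open_open (rs : List Char) :
    (rs.takeWhile (fun c => c == '(')).count '(' = (rs.takeWhile (fun c => c == '(')).length := by
  rw [List.count_eq_length]
  intro a ha
  have := List.mem_takeWhile_imp ha
  simpa using (by simpa using this : a = '(').symm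

-- the whole loop nest on the reversed view: if the first scanned char is ')', it consumes
-- exactly the maximal bracket run and returns its two bracket counts; otherwise it does nothing
theorem pvOuterA_rev (r : List Char) (i k : Nat) :
    pvOuterA r.reverse i k =
      if r.head? = some ')' then
        (i + (r.takeWhile (fun c => c == '(' || c == ')')).count ')',
         k + (r.takeWhile (fun c => c == '(' || c == ')')).count '(')
      else (i, k) := by
  match r with
  | [] => unfold pvOuterA; simp
  | c :: rs =>
    unfold pvOuterA
    by_cases hc : c = ')'
    · subst hc
      simp only [List.reverse_cons, List.getLast?_concat, List.dropLast_concat]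
      rw [pvInnerA_rev]
      rw [pvOuterA_rev (rs.dropWhile (fun c => c == '(')) (i + 1)
        (k + (rs.takeWhile (fun c => c == '(')).length)]
      have hsplit := takeWhile_br_split rs
      by_cases hd : (rs.dropWhile (fun c => c == '(')).head? = some ')'
      · simp only [if_pos hd, List.head?_cons, List.takeWhile_cons]
        simp [hsplit, List.count_append, count_takeWhile_open_close, count_takeWhile_open_open]
        constructor <;> omega
      · -- the dropWhile result starts with a non-bracket (or is empty): its bracket run is empty
        have hnil : (rs.dropWhile (fun c => c == '(')).takeWhile
            (fun c => c == '(' || c == ')') = [] := by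
          cases he : (rs.dropWhile (fun c => c == '(')) with
          | nil => simp
          | cons d ds =>
            have hdne : d ≠ '(' := by
              have := List.head?_dropWhile_not (fun c => c == '(') rs
              rw [he] at this; simpa using this
            have hdne2 : d ≠ ')' := by
              intro h; apply hd; rw [he, h]; rfl
            simp [hdne, hdne2]
        simp only [if_neg hd, List.head?_cons, List.takeWhile_cons]
        simp [hsplit, hnil, count_takeWhile_open_close,
          count_takeWhile_open_open]
    · have hlast : (rs.reverse ++ [c]).getLast? = some c := List.getLast?_concat
      simp only [List.reverse_cons, hlast, Option.some.injEq]
      rw [dif_neg (by simpa using hc)]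
      simp [hc]
  termination_by r.length
  decreasing_by
    have := List.length_dropWhile_le (fun c => c == '(') rs
    simp; omega

-- ===== VERDICT (by name: the statement is the Claim_ definition above) =====
theorem skobki_spec : Claim_equal_skobki := by
  intro s _
  simp only [Spec_skobki, skobki, skobki_alt]
  have h := pvOuterA_rev s.toList.reverse 0 0
  rw [List.reverse_reverse] at h
  rw [h]
  cases he : s.toList.reverse with
  | nil => simp
  | cons c rs =>
    by_cases hc : c = ')'
    · subst hc
      rw [if_pos (show (')' :: rs).head? = some ')' from rfl)]
      have htw : List.takeWhile (fun c => c == '(' || c == ')') (')' :: rs) =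
          ')' :: List.takeWhile (fun c => c == '(' || c == ')') rs := by simp
      rw [htw]
      set t := List.takeWhile (fun c => c == '(' || c == ')') rs with ht
      simp only [List.count_cons, List.take_succ_cons, List.take_zero, Nat.zero_add]
      norm_num
      set a := t.count ')' with ha
      set b := t.count '(' with hb
      by_cases hab : a + 1 = b
      · simp [hab]; omega
      · have h1 : ((a + 1 == b) : Bool) = false := by simpa using hab
        have h2 : ((b == a + 1) : Bool) = false := by simpa using fun h => hab h.symm
        simp [h1, h2]
    · simp only [List.head?_cons, Option.some.injEq]
      rw [if_neg (by simpa using hc)]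
      by_cases hbr : c = '('
      · subst hbr; simp
      · simp [hbr, hc]
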